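-- pv_equiv track=rewrite | github.com/need-singularity/sylvian-singularity | math/frontier_800_verify.py | jordan
-- ===== SOURCE A (Python) =====
-- def jordan(n, k=2):
--     """Jordan's totient J_k(n) = n^k * prod(1-1/p^k)"""
--     r = n**k
--     t, p = n, 2
--     while p*p <= t:
--         if t % p == 0:
--             r = r * (p**k - 1) // (p**k)
--             while t % p == 0: t //= p
--         p += 1
--     if t > 1: r = r * (t**k - 1) // (t**k)
--     return r
-- ===== SOURCE B (Python) =====
-- def jordan(n, k=2):
--     """Jordan's totient, multiplicatively: J_k(p**e * m) = (p**(k*e) - p**(k*(e-1))) * J_k(m)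
--     with gcd(p, m) = 1; recurse on the smallest prime factor, no global n**k and no division of r."""
--     if n <= 1:
--         return n ** k
--     p = 2
--     while p * p <= n and n % p:
--         p += 1
--     if p * p > n:
--         p = n
--     e, m = 0, n
--     while m % p == 0:
--         m //= p
--         e += 1
--     return (p ** (k * e) - p ** (k * (e - 1))) * jordan(m, k)
-- ===== Notes on version B (the rewrite author's own statement) =====
-- stated objective: alternative
-- what changed: B replaces A's interleaved loop (compute n**k, then repeatedly multiply by p**k-1 and floor-divide by p**k) by a multiplicative recursion: peel off the smallest prime power p**e of n and multiply the exact prime-power value p**(k*e) - p**(k*(e-1)) into the product, recursing on the coprime cofactor; no n**k is ever formed and no division of the result occurs.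
-- outside the precondition, e.g. on jordan(2, -1): A returns -1.0, B returns -0.5; on jordan(0, -1): A raises ZeroDivisionError, B raises ZeroDivisionError
import Mathlib
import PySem

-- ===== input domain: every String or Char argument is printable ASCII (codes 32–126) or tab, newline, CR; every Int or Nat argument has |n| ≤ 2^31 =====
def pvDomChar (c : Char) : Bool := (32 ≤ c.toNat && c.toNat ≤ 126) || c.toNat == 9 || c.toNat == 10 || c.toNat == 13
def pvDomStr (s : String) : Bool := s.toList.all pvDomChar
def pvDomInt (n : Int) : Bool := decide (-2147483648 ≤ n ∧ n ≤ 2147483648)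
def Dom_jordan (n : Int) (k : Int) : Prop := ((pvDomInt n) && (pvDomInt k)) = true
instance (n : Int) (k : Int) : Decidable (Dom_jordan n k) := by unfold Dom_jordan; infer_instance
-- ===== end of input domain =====

-- B replaces A's "n^k then multiply-and-floor-divide per prime" loop by a multiplicative
-- recursion on the smallest prime factor, multiplying exact prime-power values p^(ke)-p^(k(e-1)).

-- small arithmetic kit (kept tiny: these lemmas sit in the definitions' closures)
theorem pvToNatLt (a b : Int) (h : a < b) (ha : 0 ≤ a) : a.toNat < b.toNat := by omega

theorem pvTltTP (t p : Int) (ht : 0 < t) (hp : 1 < p) : t < t * p := by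
  calc t = t * 1 := (mul_one t).symm
    _ < t * p := mul_lt_mul_of_pos_left hp ht

theorem pvFdPos (t p : Int) (hp : 0 < p) (hpt : p ≤ t) : 0 < PySem.Int.floordiv t p :=
  (PySem.Int.le_floordiv_iff_mul_le hp).2 (by rw [zero_add, one_mul]; exact hpt)

theorem pvFdLt (t p : Int) (ht : 0 < t) (hp : 0 < p) (hp1 : 1 < p) :
    PySem.Int.floordiv t p < t :=
  (PySem.Int.floordiv_lt_iff_lt_mul hp).2 (pvTltTP t p ht hp1)

theorem pvFdNonneg (t p : Int) (ht : 0 ≤ t) (hp : 0 < p) : 0 ≤ PySem.Int.floordiv t p :=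
  (PySem.Int.le_floordiv_iff_mul_le hp).2 (by rw [zero_mul]; exact ht)

theorem pvPosT (t p : Int) (hpp : p * p ≤ t) (hp : 2 ≤ p) : 0 < t :=
  lt_of_lt_of_le (mul_pos (by omega) (by omega)) hpp

theorem pvPLtT (t p : Int) (hpp : p * p ≤ t) (hp : 2 ≤ p) : p < t :=
  lt_of_lt_of_le
    (by calc p = p * 1 := (mul_one p).symm
          _ < p * p := mul_lt_mul_of_pos_left (by omega) (by omega)) hpp

-- termination helper for the division-out loops (cited by both ports)
theorem pvDivShrink (t p : Int) (h : 0 < t ∧ 2 ≤ p ∧ PySem.Int.mod t p = 0) :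
    (PySem.Int.floordiv t p).toNat < t.toNat := by
  obtain ⟨h0, hp2, hm⟩ := h
  exact pvToNatLt _ _ (pvFdLt t p h0 (by omega) (by omega))
    (pvFdNonneg t p (le_of_lt h0) (by omega))

-- ===== PORT A =====
-- inner loop: while t % p == 0: t //= p
def stripA (t p : Int) : Int :=
  if _h : 0 < t ∧ 2 ≤ p ∧ PySem.Int.mod t p = 0 then stripA (PySem.Int.floordiv t p) p else t
termination_by t.toNat
decreasing_by exact pvDivShrink t p _h

theorem stripA_le (t p : Int) (ht : 0 < t) : 0 < stripA t p ∧ stripA t p ≤ t := by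
  fun_induction stripA t p with
  | case1 t h ih =>
    have hp : (0:Int) < p := by omega
    have hd : p ∣ t := (PySem.Int.mod_eq_zero_iff_dvd t p).1 h.2.2
    have hpt : p ≤ t := Int.le_of_dvd h.1 hd
    have h1 : 0 < PySem.Int.floordiv t p := pvFdPos t p hp hpt
    have h2 : PySem.Int.floordiv t p ≤ t := le_of_lt (pvFdLt t p h.1 hp (by omega))
    have := ih h1
    exact ⟨this.1, le_trans this.2 h2⟩
  | case2 t h => exact ⟨ht, le_refl t⟩

theorem pvToNatShrink (s t p : Int) (hs : s ≤ t) (hpt : p < t) :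
    (s - (p + 1) + 1).toNat < (t - p + 1).toNat := by omega

theorem pvLoopShrinkA (t p : Int) (h : p * p ≤ t ∧ 2 ≤ p) :
    (stripA t p - (p + 1) + 1).toNat < (t - p + 1).toNat :=
  pvToNatShrink _ t p (stripA_le t p (pvPosT t p h.1 h.2)).2 (pvPLtT t p h.1 h.2)

theorem pvLoopShrinkB (t p : Int) (h : p * p ≤ t ∧ 2 ≤ p) :
    (t - (p + 1) + 1).toNat < (t - p + 1).toNat :=
  pvToNatShrink t t p (le_refl t) (pvPLtT t p h.1 h.2)

-- outer loop of A, carrying (r, t) with p counting up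
def loopA (k r t p : Int) : Int × Int :=
  if h : p * p ≤ t ∧ 2 ≤ p then
    if PySem.Int.mod t p = 0 then
      loopA k (PySem.Int.floordiv (r * (p ^ k.toNat - 1)) (p ^ k.toNat)) (stripA t p) (p + 1)
    else loopA k r t (p + 1)
  else (r, t)
termination_by (t - p + 1).toNat
decreasing_by
  · exact pvLoopShrinkA t p h
  · exact pvLoopShrinkB t p h

def jordan (n : Int) (k : Int) : Int :=
  let r := n ^ k.toNat
  let rt := loopA k r n 2
  if rt.2 > 1 then PySem.Int.floordiv (rt.1 * (rt.2 ^ k.toNat - 1)) (rt.2 ^ k.toNat) else rt.1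

-- ===== PORT B =====
theorem pvSpfStep (n p : Int) (hpn : p < n) : (n - (p + 1)).toNat < (n - p).toNat := by
  omega

theorem pvSpfShrink (n p : Int) (h : 2 ≤ p ∧ p * p ≤ n ∧ PySem.Int.mod n p ≠ 0) :
    (n - (p + 1)).toNat < (n - p).toNat :=
  pvSpfStep n p (pvPLtT n p h.2.1 h.1)

-- smallest-prime-factor scan: while p*p <= n and n % p: p += 1  (2 ≤ p is a totality guard only)
def spfLoop (n p : Int) : Int :=
  if h : 2 ≤ p ∧ p * p ≤ n ∧ PySem.Int.mod n p ≠ 0 then spfLoop n (p + 1) else p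
termination_by (n - p).toNat
decreasing_by exact pvSpfShrink n p h

def spfB (n : Int) : Int :=
  let p := spfLoop n 2
  if p * p > n then n else p

-- while m % p == 0: m //= p; e += 1   (returns (m, e); 0 < t, 2 ≤ p are totality guards only)
def stripE (t p e : Int) : Int × Int :=
  if _h : 0 < t ∧ 2 ≤ p ∧ PySem.Int.mod t p = 0 then stripE (PySem.Int.floordiv t p) p (e + 1)
  else (t, e)
termination_by t.toNat
decreasing_by exact pvDivShrink t p _h

-- facts about the B helpers needed for jordan_alt's termination (cited by name there)
theorem stripE_pos_le (t p e : Int) (ht : 0 < t) :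
    0 < (stripE t p e).1 ∧ (stripE t p e).1 ≤ t := by
  fun_induction stripE t p e with
  | case1 t e h ih =>
    have hp : (0:Int) < p := by omega
    have hd : p ∣ t := (PySem.Int.mod_eq_zero_iff_dvd t p).1 h.2.2
    have hpt : p ≤ t := Int.le_of_dvd h.1 hd
    have h1 : 0 < PySem.Int.floordiv t p := pvFdPos t p hp hpt
    have h2 : PySem.Int.floordiv t p ≤ t := le_of_lt (pvFdLt t p h.1 hp (by omega))
    have := ih h1
    exact ⟨this.1, le_trans this.2 h2⟩
  | case2 t e h => exact ⟨ht, le_refl t⟩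

theorem spfLoop_ge (n p : Int) : p ≤ spfLoop n p := by
  fun_induction spfLoop n p with
  | case1 p h ih => omega
  | case2 p h => omega

theorem spfLoop_exit (n p : Int) :
    ¬ (2 ≤ spfLoop n p ∧ spfLoop n p * spfLoop n p ≤ n ∧ PySem.Int.mod n (spfLoop n p) ≠ 0) := by
  fun_induction spfLoop n p with
  | case1 p h ih => exact ih
  | case2 p h => exact h

theorem spfB_dvd (n : Int) (hn : 2 ≤ n) : 2 ≤ spfB n ∧ spfB n ∣ n := by
  unfold spfB
  by_cases hq : spfLoop n 2 * spfLoop n 2 > n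
  · simp only [hq, if_pos]
    exact ⟨hn, dvd_refl n⟩
  · simp only [hq, if_false]
    have h2 : (2:Int) ≤ spfLoop n 2 := spfLoop_ge n 2
    refine ⟨h2, ?_⟩
    have hex := spfLoop_exit n 2
    have hm : PySem.Int.mod n (spfLoop n 2) = 0 := by
      by_contra hne
      exact hex ⟨h2, by omega, hne⟩
    exact (PySem.Int.mod_eq_zero_iff_dvd n (spfLoop n 2)).1 hm

theorem stripE_fst_lt (n p : Int) (hn : 2 ≤ n) (hp : 2 ≤ p) (hd : PySem.Int.mod n p = 0) :
    (stripE n p 0).1 < n ∧ 0 < (stripE n p 0).1 := by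
  rw [stripE, dif_pos ⟨by omega, hp, hd⟩]
  have hp0 : (0:Int) < p := by omega
  have hn0 : (0:Int) < n := by omega
  have hpn : p ≤ n := Int.le_of_dvd hn0 ((PySem.Int.mod_eq_zero_iff_dvd n p).1 hd)
  have h1 : 0 < PySem.Int.floordiv n p := pvFdPos n p hp0 hpn
  have h2 : PySem.Int.floordiv n p < n := pvFdLt n p hn0 hp0 (by omega)
  have := stripE_pos_le (PySem.Int.floordiv n p) p 1 h1
  exact ⟨lt_of_le_of_lt this.2 h2, this.1⟩

theorem pvAltShrink (n : Int) (h : ¬ n ≤ 1) :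
    ((stripE n (spfB n) 0).1).toNat < n.toNat := by
  have hn : 2 ≤ n := by omega
  have hs := spfB_dvd n hn
  have hd : PySem.Int.mod n (spfB n) = 0 := (PySem.Int.mod_eq_zero_iff_dvd n (spfB n)).2 hs.2
  have := stripE_fst_lt n (spfB n) hn hs.1 hd
  exact pvToNatLt _ _ this.1 (le_of_lt this.2)

def jordan_alt (n : Int) (k : Int) : Int :=
  if _hn : n ≤ 1 then n ^ k.toNat
  else
    let p := spfB n
    let me := stripE n p 0
    (p ^ (k * me.2).toNat - p ^ (k * (me.2 - 1)).toNat) * jordan_alt me.1 k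
termination_by n.toNat
decreasing_by exact pvAltShrink n _hn

-- ===== PRECONDITION & SPEC =====
-- Pre_ excludes k < 0: there n ** k is a float in Python, so A returns a float (not an Int)
-- or raises ZeroDivisionError for n = 0.
def Pre_jordan (n : Int) (k : Int) : Prop := 0 ≤ k
instance (n : Int) (k : Int) : Decidable (Pre_jordan n k) := by unfold Pre_jordan; infer_instance
def pvWitness_jordan : Int × Int := (12, 2)

def Spec_jordan (n : Int) (k : Int) (out : Int) : Prop := out = jordan_alt n k
instance (n : Int) (k : Int) (out : Int) : Decidable (Spec_jordan n k out) := by unfold Spec_jordan; infer_instance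

-- ===== CLAIM (what is proved, stated in full; the proofs are below) =====
def Claim_equal_jordan : Prop := ∀ (n : Int) (k : Int), Dom_jordan n k → Pre_jordan n k → Spec_jordan n k (jordan n k)

-- ===== LEMMAS AND PROOFS =====

-- A's trailing "if t > 1" step, as a helper over the loop's (r, t) state
def tailJ (k : Int) (rt : Int × Int) : Int :=
  if rt.2 > 1 then PySem.Int.floordiv (rt.1 * (rt.2 ^ k.toNat - 1)) (rt.2 ^ k.toNat) else rt.1

theorem jordan_eq_tailJ (n k : Int) : jordan n k = tailJ k (loopA k (n ^ k.toNat) n 2) := rfl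

theorem fd_exact (b x : Int) (hb : 0 < b) : PySem.Int.floordiv (b * x) b = x := by
  rw [PySem.Int.floordiv_eq_ediv_of_pos hb]
  exact Int.mul_ediv_cancel_left x (ne_of_gt hb)

theorem stripA_not_dvd (t p : Int) (ht : 0 < t) (hp : 2 ≤ p) : ¬ p ∣ stripA t p := by
  fun_induction stripA t p with
  | case1 t h ih =>
    have hp0 : (0:Int) < p := by omega
    have h1 : 0 < PySem.Int.floordiv t p :=
      (PySem.Int.le_floordiv_iff_mul_le hp0).2 (by
        have hd : p ∣ t := (PySem.Int.mod_eq_zero_iff_dvd t p).1 h.2.2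
        nlinarith [Int.le_of_dvd h.1 hd])
    exact ih h1
  | case2 t h =>
    intro hdvd
    exact h ⟨ht, hp, (PySem.Int.mod_eq_zero_iff_dvd t p).2 hdvd⟩

theorem stripE_spec (t p e : Int) (ht : 0 < t) (hp : 2 ≤ p) :
    ∃ m : ℕ, stripE t p e = (stripA t p, e + (m:ℤ)) ∧ t = p ^ m * stripA t p := by
  fun_induction stripE t p e with
  | case1 t e h ih =>
    have hp0 : (0:Int) < p := by omega
    have hd : p ∣ t := (PySem.Int.mod_eq_zero_iff_dvd t p).1 h.2.2
    have hqpos : 0 < PySem.Int.floordiv t p :=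
      (PySem.Int.le_floordiv_iff_mul_le hp0).2 (by nlinarith [Int.le_of_dvd h.1 hd])
    obtain ⟨m, hE, hfac⟩ := ih hqpos
    have hsA : stripA t p = stripA (PySem.Int.floordiv t p) p := by
      rw [stripA, dif_pos h]
    have hmul : p * PySem.Int.floordiv t p = t := by
      obtain ⟨q, hq⟩ := hd
      rw [hq, fd_exact p q hp0]
    refine ⟨m + 1, ?_, ?_⟩
    · rw [hE, hsA, show e + 1 + (m:ℤ) = e + ((m + 1 : ℕ):ℤ) by push_cast; ring]
    · calc t = p * PySem.Int.floordiv t p := hmul.symm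
        _ = p * (p ^ m * stripA (PySem.Int.floordiv t p) p) := by rw [← hfac]
        _ = p ^ (m + 1) * stripA t p := by rw [hsA]; ring
  | case2 t e h =>
    refine ⟨0, ?_, ?_⟩
    · rw [stripA, dif_neg h]; simp
    · rw [stripA, dif_neg h]; ring

theorem spfLoop_found (t p : Int) (hp : 2 ≤ p) (hg : p * p ≤ t) (hpd : p ∣ t)
    (hmin : ∀ d : Int, 2 ≤ d → d < p → ¬ d ∣ t) :
    ∀ (M : ℕ) (q : Int), (p - q).toNat ≤ M → 2 ≤ q → q ≤ p → spfLoop t q = p := by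
  intro M
  induction M with
  | zero =>
    intro q hM h2 hle
    have hqp : q = p := by omega
    subst hqp
    rw [spfLoop, dif_neg (by rintro ⟨-, -, hne⟩; exact hne ((PySem.Int.mod_eq_zero_iff_dvd t q).2 hpd))]
  | succ M ihM =>
    intro q hM h2 hle
    by_cases hqp : q = p
    · subst hqp
      rw [spfLoop, dif_neg (by rintro ⟨-, -, hne⟩; exact hne ((PySem.Int.mod_eq_zero_iff_dvd t q).2 hpd))]
    · have hlt : q < p := by omega
      rw [spfLoop, dif_pos ⟨h2, by nlinarith,
        by intro h0; exact hmin q h2 hlt ((PySem.Int.mod_eq_zero_iff_dvd t q).1 h0)⟩]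
      exact ihM (q + 1) (by omega) (by omega) (by omega)

theorem jordan_alt_step (n k : Int) (hn : ¬ n ≤ 1) :
    jordan_alt n k = ((spfB n) ^ (k * (stripE n (spfB n) 0).2).toNat -
      (spfB n) ^ (k * ((stripE n (spfB n) 0).2 - 1)).toNat) * jordan_alt (stripE n (spfB n) 0).1 k := by
  rw [jordan_alt, dif_neg hn]

theorem jordan_alt_one (k : Int) : jordan_alt 1 k = 1 := by
  rw [jordan_alt, dif_pos (le_refl 1)]; exact one_pow _

-- exit of A's loop (p*p > t): A's tail step equals B's value at t
theorem pvExitCase (k t p c : Int) (hk : 0 ≤ k) (ht : 1 ≤ t) (hp : 2 ≤ p)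
    (hg : ¬ p * p ≤ t) (hmin : ∀ d : Int, 2 ≤ d → d < p → ¬ d ∣ t) :
    tailJ k (t ^ k.toNat * c, t) = c * jordan_alt t k := by
  by_cases ht1 : t > 1
  · have htK : (0:Int) < t ^ k.toNat := pow_pos (by omega) _
    have hL : tailJ k (t ^ k.toNat * c, t) = c * (t ^ k.toNat - 1) := by
      unfold tailJ
      rw [if_pos (by exact ht1)]
      have h2 : (t ^ k.toNat * c, t).1 * ((t ^ k.toNat * c, t).2 ^ k.toNat - 1)
          = t ^ k.toNat * (c * (t ^ k.toNat - 1)) := by ring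
      rw [h2]
      exact fd_exact _ _ htK
    rw [hL]
    have hnone : ∀ d : Int, 2 ≤ d → d * d ≤ t → ¬ d ∣ t := by
      intro d hd2 hdt
      exact hmin d hd2 (by nlinarith)
    have hq2 : (2:Int) ≤ spfLoop t 2 := spfLoop_ge t 2
    have hqq : t < spfLoop t 2 * spfLoop t 2 := by
      by_contra hcon
      rw [not_lt] at hcon
      have hm : PySem.Int.mod t (spfLoop t 2) = 0 := by
        by_contra hne
        exact spfLoop_exit t 2 ⟨hq2, hcon, hne⟩
      exact hnone _ hq2 hcon ((PySem.Int.mod_eq_zero_iff_dvd t _).1 hm)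
    have hspf : spfB t = t := by
      unfold spfB
      rw [if_pos (by exact hqq)]
    have hstep1 : PySem.Int.mod t t = 0 := (PySem.Int.mod_eq_zero_iff_dvd t t).2 dvd_rfl
    have hfd : PySem.Int.floordiv t t = 1 := by
      have := fd_exact t 1 (by omega : (0:Int) < t)
      rwa [mul_one] at this
    have hstop : ¬ (0 < (1:Int) ∧ 2 ≤ t ∧ PySem.Int.mod 1 t = 0) := by
      rintro ⟨-, h2, hm1⟩
      have hdv := (PySem.Int.mod_eq_zero_iff_dvd 1 t).1 hm1
      have := Int.le_of_dvd one_pos hdv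
      omega
    have hse : stripE t t 0 = (1, 1) := by
      rw [stripE, dif_pos ⟨by omega, by omega, hstep1⟩, hfd, stripE, dif_neg hstop]
      norm_num
    rw [jordan_alt_step t k (by omega), hspf, hse, jordan_alt_one]
    norm_num
  · have ht1' : t = 1 := by omega
    subst ht1'
    unfold tailJ
    rw [if_neg (by norm_num)]
    rw [jordan_alt_one]
    simp

-- main invariant: from state (t^k * c, t, p) with t's prime factors all ≥ p,
-- A's loop followed by its tail computes c times B's recursion at t
theorem pvMain (k : Int) (hk : 0 ≤ k) : ∀ (N : ℕ) (t p c : Int),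
    (t - p + 1).toNat ≤ N → 1 ≤ t → 2 ≤ p →
    (∀ d : Int, 2 ≤ d → d < p → ¬ d ∣ t) →
    tailJ k (loopA k (t ^ k.toNat * c) t p) = c * jordan_alt t k := by
  intro N
  induction N with
  | zero =>
    intro t p c hN ht hp hmin
    have hg : ¬ p * p ≤ t := by
      intro hcon
      have h1 : t - p + 1 ≤ 0 := by omega
      nlinarith
    rw [loopA, dif_neg (by rintro ⟨h1, -⟩; exact hg h1)]
    exact pvExitCase k t p c hk ht hp hg hmin
  | succ N ihN =>
    intro t p c hN ht hp hmin
    by_cases hg : p * p ≤ t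
    · by_cases hm : PySem.Int.mod t p = 0
      · -- divide out p and recurse
        rw [loopA, dif_pos ⟨hg, hp⟩, if_pos hm]
        have hsp := stripA_le t p (by omega)
        have hnd : ¬ p ∣ stripA t p := stripA_not_dvd t p (by omega) hp
        obtain ⟨m, hE, hfact⟩ := stripE_spec t p 0 (by omega) hp
        have hpd : p ∣ t := (PySem.Int.mod_eq_zero_iff_dvd t p).1 hm
        have hm0 : m ≠ 0 := by
          rintro rfl
          rw [pow_zero, one_mul] at hfact
          exact hnd (hfact ▸ hpd)
        obtain ⟨m', rfl⟩ : ∃ m', m = m' + 1 := ⟨m - 1, by omega⟩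
        have hp0 : (0:Int) < p := by omega
        have hpK : (0:Int) < p ^ k.toNat := pow_pos hp0 _
        have hsdvd : stripA t p ∣ t := ⟨p ^ (m' + 1), by
          conv_lhs => rw [hfact]
          ring⟩
        have h1 : t ^ k.toNat = p ^ ((m' + 1) * k.toNat) * (stripA t p) ^ k.toNat := by
          conv_lhs => rw [hfact]
          rw [mul_pow, ← pow_mul]
        have hsplit : p ^ ((m' + 1) * k.toNat) = p ^ (m' * k.toNat) * p ^ k.toNat := by
          rw [show (m' + 1) * k.toNat = m' * k.toNat + k.toNat from by ring, pow_add]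
        have hr : PySem.Int.floordiv (t ^ k.toNat * c * (p ^ k.toNat - 1)) (p ^ k.toNat)
            = (stripA t p) ^ k.toNat * (c * (p ^ ((m' + 1) * k.toNat) - p ^ (m' * k.toNat))) := by
          have h2 : t ^ k.toNat * c * (p ^ k.toNat - 1)
              = p ^ k.toNat * ((stripA t p) ^ k.toNat *
                  (c * (p ^ ((m' + 1) * k.toNat) - p ^ (m' * k.toNat)))) := by
            rw [h1, hsplit]; ring
          rw [h2, fd_exact _ _ hpK]
        rw [hr]
        have hmin' : ∀ d : Int, 2 ≤ d → d < p + 1 → ¬ d ∣ stripA t p := by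
          intro d h2 hlt hdvd
          by_cases hdp : d = p
          · exact hnd (hdp ▸ hdvd)
          · exact hmin d h2 (by omega) (hdvd.trans hsdvd)
        have hIH := ihN (stripA t p) (p + 1) (c * (p ^ ((m' + 1) * k.toNat) - p ^ (m' * k.toNat)))
          (by omega) (by omega) (by omega) hmin'
        rw [hIH]
        have ht2 : ¬ t ≤ 1 := by
          have := Int.le_of_dvd (by omega) hpd
          omega
        have hspf : spfB t = p := by
          have hfound : spfLoop t 2 = p :=
            spfLoop_found t p hp hg hpd hmin ((p - 2).toNat) 2 (le_refl _) (le_refl 2) hp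
          unfold spfB
          rw [hfound, if_neg (by omega)]
        rw [jordan_alt_step t k ht2, hspf, hE]
        have hkK : k = (k.toNat : ℤ) := (Int.toNat_of_nonneg hk).symm
        have e1 : (k * ((0:ℤ) + ((m' + 1 : ℕ) : ℤ))).toNat = (m' + 1) * k.toNat := by
          conv_lhs => rw [zero_add, hkK,
            show ((k.toNat : ℤ) * ((m' + 1 : ℕ) : ℤ)) = (((m' + 1) * k.toNat : ℕ) : ℤ) from by
              push_cast; ring]
          exact Int.toNat_natCast _
        have e0 : (k * ((0:ℤ) + ((m' + 1 : ℕ) : ℤ) - 1)).toNat = m' * k.toNat := by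
          conv_lhs => rw [
            show ((0:ℤ) + ((m' + 1 : ℕ) : ℤ) - 1) = ((m' : ℕ) : ℤ) from by push_cast; ring,
            hkK,
            show ((k.toNat : ℤ) * ((m' : ℕ) : ℤ)) = ((m' * k.toNat : ℕ) : ℤ) from by
              push_cast; ring]
          exact Int.toNat_natCast _
        rw [e1, e0]
        ring
      · -- p does not divide t: step p
        rw [loopA, dif_pos ⟨hg, hp⟩, if_neg hm]
        have hpt : p < t := by nlinarith
        apply ihN t (p + 1) c (by omega) ht (by omega)
        intro d h2 hlt hdvd
        by_cases hdp : d = p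
        · exact hm ((PySem.Int.mod_eq_zero_iff_dvd t p).2 (hdp ▸ hdvd))
        · exact hmin d h2 (by omega) hdvd
    · rw [loopA, dif_neg (by rintro ⟨h1, -⟩; exact hg h1)]
      exact pvExitCase k t p c hk ht hp hg hmin

-- ===== VERDICT (by name: the statement is the Claim_ definition above) =====
theorem jordan_spec : Claim_equal_jordan := by
  intro n k _hd hk
  unfold Spec_jordan
  rw [jordan_eq_tailJ]
  by_cases hn : n ≤ 1
  · rw [loopA, dif_neg (by rintro ⟨h1, -⟩; omega)]
    unfold tailJ
    rw [if_neg (by exact not_lt.2 hn)]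
    rw [jordan_alt, dif_pos hn]
  · have hmain := pvMain k hk ((n - 2 + 1).toNat) n 2 1 (le_refl _) (by omega) (le_refl 2)
      (fun d h2 hlt => absurd h2 (by omega))
    rw [mul_one] at hmain
    rw [hmain, one_mul]
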